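-- pv_equiv track=rewrite | github.com/nonhashtag/AlgorithmStudy | Programmers/힙/More_spicy.py | solution
-- ===== SOURCE A (Python) =====
-- def solution(scoville, K):
--     answer = 0
--     arr= scoville
--     while len(arr) >= 2:
--         if all(i>=K for i in arr):
--             break
--         arr.sort(reverse=True)
--         arr[1]=arr[0] + 2*arr[1]
--         del(arr[0])
--         answer+=1
--
--     #실패시 -1리턴
--     if any(i<K for i in arr):
--         return -1
--     return answer
-- ===== SOURCE B (Python) =====
-- # Sort once (descending) and re-insert each merged value in place of re-sorting
-- # every iteration; the all(...)/any(...) scans collapse to one upfront min check.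
-- # Equivalence is about the return value: A sorts/shrinks `scoville` in place, B does not.
-- def solution(scoville, K):
--     if not scoville or min(scoville) >= K:
--         return 0
--     arr = sorted(scoville, reverse=True)
--     while len(arr) >= 2:
--         v = arr[0] + 2 * arr[1]
--         del arr[:2]
--         i = 0
--         while i < len(arr) and arr[i] > v:
--             i += 1
--         arr.insert(i, v)
--     return len(scoville) - 1 if arr[0] >= K else -1
-- ===== Notes on version B (the rewrite author's own statement) =====
-- stated objective: faster
-- what changed: B sorts once, checks min(scoville) upfront instead of re-running all()/any() scans every iteration, and keeps the list ordered by inserting each merged value at its position, instead of A's full re-sort of the whole list on every loop iteration; equivalence is about the return value (A sorts/shrinks scoville in place, B does not mutate it).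
import Mathlib
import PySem

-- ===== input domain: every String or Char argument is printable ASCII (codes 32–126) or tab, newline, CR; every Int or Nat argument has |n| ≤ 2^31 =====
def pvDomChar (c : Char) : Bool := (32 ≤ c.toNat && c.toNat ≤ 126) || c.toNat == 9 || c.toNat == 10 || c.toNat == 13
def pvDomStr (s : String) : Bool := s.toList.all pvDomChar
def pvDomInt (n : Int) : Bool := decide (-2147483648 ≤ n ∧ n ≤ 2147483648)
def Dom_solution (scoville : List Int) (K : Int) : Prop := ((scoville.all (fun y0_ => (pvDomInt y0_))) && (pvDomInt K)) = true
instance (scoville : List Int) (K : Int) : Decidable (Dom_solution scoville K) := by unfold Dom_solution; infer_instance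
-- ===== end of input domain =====

-- B sorts once and re-inserts each merged value instead of A's per-iteration re-sort and
-- all()/any() scans (one upfront min check); equivalence is about the return value only
-- (Python A sorts/shrinks `scoville` in place, B does not mutate it).

-- ===== PORT A =====
-- arr.sort(reverse=True)  (both Pythons sort descending with no key)
def pvSortDesc (xs : List Int) : List Int := PySem.List.sorted xs (fun x => x) true

-- the while-loop of A: returns (answer, arr) at exit.
-- 'arr[1] = arr[0] + 2*arr[1]; del(arr[0])' on the sorted list d is rendered by the
-- match 'a :: b :: rest ↦ (a + 2*b) :: rest'; the '_' branch is unreachable (sort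
-- preserves length, which the guard makes ≥ 2).
def aLoop (arr : List Int) (K : Int) (answer : Int) : Int × List Int :=
  if 2 ≤ arr.length then
    if arr.all (fun i => decide (K ≤ i)) then (answer, arr)
    else
      match hm : pvSortDesc arr with
      | a :: b :: rest => aLoop ((a + 2 * b) :: rest) K (answer + 1)
      | _ => (answer, arr)
  else (answer, arr)
termination_by arr.length
decreasing_by
  have hl : (pvSortDesc arr).length = arr.length :=
    PySem.List.length_sorted arr (fun x => x) true
  rw [hm] at hl
  simp at hl ⊢
  omega

def solution (scoville : List Int) (K : Int) : Int :=
  let r := aLoop scoville K 0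
  if r.2.any (fun i => decide (i < K)) then -1 else r.1

-- ===== PORT B =====
-- the inner 'while i < len(arr) and arr[i] > v' scan followed by 'arr.insert(i, v)'
def insDesc (arr : List Int) (v : Int) : List Int :=
  match arr with
  | [] => [v]
  | a :: t => if v < a then a :: insDesc t v else v :: a :: t

theorem length_insDesc (arr : List Int) (v : Int) :
    (insDesc arr v).length = arr.length + 1 := by
  induction arr with
  | nil => rfl
  | cons a t ih => simp only [insDesc]; split <;> simp [ih]

-- the outer while-loop of B: 'v = arr[0] + 2*arr[1]; del arr[:2]; …insert…'
def bLoop (arr : List Int) : List Int :=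
  match arr with
  | a :: b :: rest => bLoop (insDesc rest (a + 2 * b))
  | _ => arr
termination_by arr.length
decreasing_by simp [length_insDesc]

def solution_alt (scoville : List Int) (K : Int) : Int :=
  match PySem.List.min? scoville (fun x => x) with
  | none => 0                       -- 'not scoville'
  | some m =>
    if K ≤ m then 0                 -- 'min(scoville) >= K'
    else
      let arr := bLoop (pvSortDesc scoville)
      -- arr[0]: bLoop of a nonempty list is nonempty, so headD's default is never used
      if K ≤ arr.headD 0 then (scoville.length : Int) - 1 else -1

-- ===== PRECONDITION & SPEC =====
def Spec_solution (scoville : List Int) (K : Int) (out : Int) : Prop := out = solution_alt scoville K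
instance (scoville : List Int) (K : Int) (out : Int) : Decidable (Spec_solution scoville K out) := by unfold Spec_solution; infer_instance

-- ===== CLAIM (what is proved, stated in full; the proofs are below) =====
def Claim_equal_solution : Prop := ∀ (scoville : List Int) (K : Int), Dom_solution scoville K → Spec_solution scoville K (solution scoville K)

-- ===== LEMMAS AND PROOFS =====

theorem bLoop_one (x : Int) : bLoop [x] = [x] := by rw [bLoop]; simp

theorem bLoop_cons2 (a b : Int) (rest : List Int) :
    bLoop (a :: b :: rest) = bLoop (insDesc rest (a + 2 * b)) := by rw [bLoop]

-- any two descending rearrangements of the same multiset of Ints coincide, so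
-- A's re-sort of its state is exactly B's maintained descending list
theorem sortDesc_eq (s t : List Int) (hp : t.Perm s)
    (hs : t.Pairwise (fun a b : Int => b ≤ a)) : pvSortDesc s = t := by
  exact List.Perm.eq_of_pairwise
    (fun a b _ _ h1 h2 => le_antisymm h2 h1)
    (by simpa using PySem.List.sorted_pairwise_rev s (fun x => x)) hs
    ((PySem.List.sorted_perm s (fun x => x) true).trans hp.symm)

theorem perm_insDesc (arr : List Int) (v : Int) : (insDesc arr v).Perm (v :: arr) := by
  induction arr with
  | nil => rfl
  | cons a t ih =>
    simp only [insDesc]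
    split
    · exact (ih.cons a).trans (List.Perm.swap v a t)
    · rfl

theorem pairwise_insDesc (arr : List Int) (v : Int)
    (h : arr.Pairwise (fun a b : Int => b ≤ a)) :
    (insDesc arr v).Pairwise (fun a b : Int => b ≤ a) := by
  induction arr with
  | nil => simp [insDesc]
  | cons a t ih =>
    rw [List.pairwise_cons] at h
    obtain ⟨ha, ht⟩ := h
    simp only [insDesc]
    split
    · rename_i hv
      rw [List.pairwise_cons]
      refine ⟨?_, ih ht⟩
      intro y hy
      rcases List.mem_cons.mp ((perm_insDesc t v).mem_iff.mp hy) with h | h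
      · omega
      · exact ha y h
    · rename_i hv
      rw [List.pairwise_cons]
      refine ⟨?_, List.pairwise_cons.mpr ⟨ha, ht⟩⟩
      intro y hy
      rcases List.mem_cons.mp hy with h | h
      · omega
      · exact le_trans (ha y h) (by omega)

-- while the list still has ≥ 2 elements, an element below K survives the merge
theorem wit_step (a b : Int) (rest : List Int) (K x : Int)
    (hp : (a :: b :: rest).Pairwise (fun a b : Int => b ≤ a))
    (hx : x ∈ a :: b :: rest) (hxK : x < K) (hne : rest ≠ []) :
    ∃ y ∈ rest, y < K := by
  obtain ⟨r0, rs, rfl⟩ := List.exists_cons_of_ne_nil hne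
  rw [List.pairwise_cons] at hp
  obtain ⟨ha, hp⟩ := hp
  rw [List.pairwise_cons] at hp
  obtain ⟨hb, _⟩ := hp
  rcases List.mem_cons.mp hx with rfl | hx
  · have h1 : r0 ≤ x := ha r0 (by simp)
    exact ⟨r0, by simp, by omega⟩
  rcases List.mem_cons.mp hx with rfl | hx
  · have h1 : r0 ≤ x := hb r0 (by simp)
    exact ⟨r0, by simp, by omega⟩
  · exact ⟨x, hx, hxK⟩

-- the core correspondence: on a state that is some permutation s of B's sorted
-- descending list t and still contains an element < K whenever ≥ 2 remain,
-- A's loop performs exactly t.length - 1 merges and ends in the state bLoop t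
theorem loop_eq (K : Int) : ∀ (n : Nat) (t s : List Int) (c : Int),
    t.length = n → t ≠ [] →
    t.Pairwise (fun a b : Int => b ≤ a) → s.Perm t →
    (2 ≤ t.length → ∃ x ∈ t, x < K) →
    aLoop s K c = (c + (t.length : Int) - 1, bLoop t) := by
  intro n
  induction n with
  | zero => intro t s c hn hne; simp at hn; exact absurd hn hne
  | succ n ih =>
    intro t s c hn hne hpw hperm hwit
    match t with
    | [x] =>
      have hs : s = [x] := List.perm_singleton.mp hperm
      subst hs
      rw [aLoop, bLoop_one]
      norm_num
    | a :: b :: rest =>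
      have hlen : s.length = rest.length + 2 := by
        rw [hperm.length_eq]; simp
      obtain ⟨x, hxt, hxK⟩ := hwit (by simp)
      rw [aLoop]
      have h2 : 2 ≤ s.length := by omega
      rw [if_pos h2]
      have hall : s.all (fun i => decide (K ≤ i)) = false := by
        rw [List.all_eq_false]
        exact ⟨x, hperm.mem_iff.mpr hxt, by simp; omega⟩
      rw [hall]
      simp only [Bool.false_eq_true, if_false]
      have hsort : pvSortDesc s = a :: b :: rest := sortDesc_eq s _ hperm.symm hpw
      rw [hsort]
      have hrpw : rest.Pairwise (fun a b : Int => b ≤ a) :=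
        ((List.pairwise_cons.mp ((List.pairwise_cons.mp hpw).2)).2)
      have ihres := ih (insDesc rest (a + 2 * b)) ((a + 2 * b) :: rest) (c + 1)
        (by rw [length_insDesc]; simp at hn; omega)
        (by intro h; have := congrArg List.length h; simp [length_insDesc] at this)
        (pairwise_insDesc rest (a + 2 * b) hrpw)
        ((perm_insDesc rest (a + 2 * b)).symm)
        (by
          intro hl
          rw [length_insDesc] at hl
          have hrne : rest ≠ [] := by
            intro h; subst h; simp at hl
          obtain ⟨y, hy, hyK⟩ := wit_step a b rest K x hpw hxt hxK hrne
          exact ⟨y, (perm_insDesc rest (a + 2 * b)).mem_iff.mpr (by simp [hy]), hyK⟩)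
      refine ihres.trans ?_
      have hbl : bLoop (a :: b :: rest) = bLoop (insDesc rest (a + 2 * b)) :=
        bLoop_cons2 a b rest
      rw [hbl, length_insDesc]
      congr 1
      simp
      ring
    | [] => exact absurd rfl hne

theorem bLoop_singleton : ∀ (n : Nat) (t : List Int), t.length = n → t ≠ [] →
    ∃ v, bLoop t = [v] := by
  intro n
  induction n with
  | zero => intro t hn hne; simp at hn; exact absurd hn hne
  | succ n ih =>
    intro t hn hne
    match t with
    | [x] => exact ⟨x, bLoop_one x⟩
    | a :: b :: rest =>
      have := ih (insDesc rest (a + 2 * b))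
        (by rw [length_insDesc]; simp at hn; omega)
        (by intro h; have := congrArg List.length h; simp [length_insDesc] at this)
      obtain ⟨v, hv⟩ := this
      exact ⟨v, (bLoop_cons2 a b rest).trans hv⟩
    | [] => exact absurd rfl hne

-- A's loop does nothing when every element is already ≥ K
theorem aLoop_all (s : List Int) (K c : Int) (h : ∀ x ∈ s, K ≤ x) :
    aLoop s K c = (c, s) := by
  rw [aLoop]
  split
  · have : s.all (fun i => decide (K ≤ i)) = true := by
      rw [List.all_eq_true]; intro x hx; simpa using h x hx
    rw [this]; simp
  · rfl

theorem solution_eq (scoville : List Int) (K : Int) :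
    solution scoville K = solution_alt scoville K := by
  unfold solution solution_alt
  match hmin : PySem.List.min? scoville (fun x => x) with
  | none =>
    have hnil : scoville = [] := (PySem.List.min?_eq_none_iff scoville (fun x => x)).mp hmin
    subst hnil
    simp [aLoop]
  | some m =>
    have hmem : m ∈ scoville := PySem.List.min?_mem hmin
    have hmin' : ∀ y ∈ scoville, m ≤ y := by
      have := PySem.List.min?_isMin hmin; simpa using this
    by_cases hK : K ≤ m
    · -- everything already ≥ K: A breaks immediately and returns answer = 0
      rw [aLoop_all scoville K 0 (fun x hx => le_trans hK (hmin' x hx))]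
      have : scoville.any (fun i => decide (i < K)) = false := by
        rw [List.any_eq_false]
        intro x hx
        have := hmin' x hx
        simp; omega
      simp [this, hK]
    · -- some element < K: A merges down to a single element
      set t := pvSortDesc scoville with ht
      have hperm : t.Perm scoville := PySem.List.sorted_perm scoville (fun x => x) true
      have htne : t ≠ [] := by
        intro h
        rw [ht] at h
        have := (PySem.List.sorted_eq_nil_iff scoville (fun x => x) true).mp h
        subst this; simp at hmem
      have hpw : t.Pairwise (fun a b : Int => b ≤ a) := by
        simpa using PySem.List.sorted_pairwise_rev scoville (fun x => x)
      have hml : m ∈ t := hperm.mem_iff.mpr hmem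
      have hlen : t.length = scoville.length := hperm.length_eq
      rw [loop_eq K t.length t scoville 0 rfl htne hpw hperm.symm
        (fun _ => ⟨m, hml, by omega⟩)]
      obtain ⟨v, hv⟩ := bLoop_singleton t.length t rfl htne
      rw [hv]
      simp only [List.any_cons, List.any_nil, Bool.or_false, List.headD_cons]
      rw [if_neg hK]
      by_cases hvK : K ≤ v
      · have : decide (v < K) = false := by simp; omega
        rw [this, if_pos hvK]
        simp [hlen]
      · have : decide (v < K) = true := by simp; omega
        rw [this, if_neg hvK]
        simp

-- ===== VERDICT (by name: the statement is the Claim_ definition above) =====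
theorem solution_spec : Claim_equal_solution := by
  intro scoville K _
  unfold Spec_solution
  exact solution_eq scoville K
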